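-- pv_equiv track=rewrite | github.com/amitrajitbose/Competitive_Programming | Contests/bleedcode/bracket.py | checkOperatorValidation
-- ===== SOURCE A (Python) =====
-- def checkOperatorValidation(s):
--     l = len(s)
--
--     if (s[0] ==  '+' or s[0] ==  '-' or s[0] ==  '*' or s[0] ==  '/'):
--         return False
--
--     for i in range(1, l):
--         if (s[i] ==  '+' or s[i] ==  '-' or s[i] ==  '*' or s[i] ==  '/') and (s[i-1] == '(' or (i+1 < l and s[i+1] == ')')):
--             return False
--         if (s[i] ==  '+' or s[i] ==  '-' or s[i] ==  '*' or s[i] ==  '/') and ((s[i-1] ==  '+' or s[i-1] ==  '-' or s[i-1] ==  '*' or s[i-1] ==  '/') or (i+1 < l and  (s[i+1] ==  '+' or s[i+1] ==  '-' or s[i+1] ==  '*' or s[i+1] ==  '/'))):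
--             return False
--         if i == l-1 and (s[i] ==  '+' or s[i] ==  '-' or s[i] ==  '*' or s[i] ==  '/'):
--             return False
--
--     return True
-- ===== SOURCE B (Python) =====
-- def checkOperatorValidation(s):
--     ops = "+-*/"
--     if s[0] in ops or s[-1] in ops:
--         return False
--     bad = [a + b for a in ops for b in ops]
--     bad += ["(" + o for o in ops]
--     bad += [o + ")" for o in ops]
--     return not any(p in s for p in bad)
-- ===== Notes on version B (the rewrite author's own statement) =====
-- stated objective: faster
-- what changed: A's single index loop with three neighbor-checking branches (lookbehind, guarded lookahead, last-index test) is replaced by generating the finite list of 24 forbidden two-character patterns (operator-operator, open-paren-then-operator, operator-then-close-paren) once and testing each for substring membership in s with Python's native substring operator, plus one first/last-character check.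
import Mathlib
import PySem

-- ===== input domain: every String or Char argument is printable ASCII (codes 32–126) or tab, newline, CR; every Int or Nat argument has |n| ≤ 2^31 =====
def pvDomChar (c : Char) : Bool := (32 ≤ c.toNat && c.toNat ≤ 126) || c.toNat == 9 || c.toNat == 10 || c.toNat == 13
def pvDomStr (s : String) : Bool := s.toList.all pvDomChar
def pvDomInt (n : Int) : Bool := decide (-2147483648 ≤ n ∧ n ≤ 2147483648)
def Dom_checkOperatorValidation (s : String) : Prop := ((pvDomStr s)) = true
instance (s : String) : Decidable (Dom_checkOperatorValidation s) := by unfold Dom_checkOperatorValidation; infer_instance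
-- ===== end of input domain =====

-- B replaces A's three-branch neighbor-index loop by building the finite list of
-- forbidden two-character patterns once and testing each for substring membership,
-- plus one first/last-character check (measured faster: constant-factor, C-level substring search). Both raise on "".

-- ===== PORT A =====
def isOpA (c : Char) : Bool := c == '+' || c == '-' || c == '*' || c == '/'

-- A's loop 'for i in range(1, l)': structural recursion carrying the previous char p
-- (= s[i-1]) and the suffix c :: rest (c = s[i], rest.head? = s[i+1] when i+1 < l,
-- rest = [] ↔ i = l-1); the three branches are in A's order.
def loopA : Char → List Char → Bool
  | _, [] => true
  | p, c :: rest =>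
    if isOpA c && (p == '(' || rest.head? == some ')') then false
    else if isOpA c && (isOpA p || (rest.head?.map isOpA).getD false) then false
    else if rest.isEmpty && isOpA c then false
    else loopA c rest

def checkOperatorValidation (s : String) : Bool :=
  match s.toList with
  | [] => false   -- s[0] raises IndexError in Python; excluded by Pre_
  | c0 :: rest => if isOpA c0 then false else loopA c0 rest

-- ===== PORT B =====
def opsB : String := "+-*/"

-- bad = [a+b for a in ops for b in ops] + ['('+o …] + [o+')' …]
def badListB : List String :=
  (opsB.toList.flatMap fun a => opsB.toList.map fun b => String.ofList [a, b]) ++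
  opsB.toList.map (fun o => String.ofList ['(', o]) ++
  opsB.toList.map (fun o => String.ofList [o, ')'])

def checkOperatorValidation_alt (s : String) : Bool :=
  match s.toList with
  | [] => false   -- s[0] raises IndexError in Python; excluded by Pre_
  | c :: rest =>
    -- s[0] in ops or s[-1] in ops
    if PySem.Chars.isIn [c] opsB.toList || PySem.Chars.isIn [rest.getLastD c] opsB.toList then false
    -- not any(p in s for p in bad)
    else !(badListB.any fun p => PySem.Str.isIn p s)

-- ===== PRECONDITION & SPEC =====
-- Pre_ excludes only the empty string, on which both Pythons raise IndexError at s[0].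
def Pre_checkOperatorValidation (s : String) : Prop := s ≠ ""
instance (s : String) : Decidable (Pre_checkOperatorValidation s) := by unfold Pre_checkOperatorValidation; infer_instance

def pvWitness_checkOperatorValidation : String := "1+2"

def Spec_checkOperatorValidation (s : String) (out : Bool) : Prop := out = checkOperatorValidation_alt s
instance (s : String) (out : Bool) : Decidable (Spec_checkOperatorValidation s out) := by unfold Spec_checkOperatorValidation; infer_instance

-- ===== CLAIM (what is proved, stated in full; the proofs are below) =====
def Claim_equal_checkOperatorValidation : Prop := ∀ (s : String), Dom_checkOperatorValidation s → Pre_checkOperatorValidation s → Spec_checkOperatorValidation s (checkOperatorValidation s)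

-- ===== LEMMAS AND PROOFS =====

theorem hops : opsB.toList = ['+', '-', '*', '/'] := rfl

theorem toList_ofList (l : List Char) : (String.ofList l).toList = l := by simp

-- the bad-pair predicate, compact form
def bp (x y : Char) : Bool := (isOpA y && (isOpA x || x == '(')) || (isOpA x && y == ')')

theorem single_isIn (c : Char) : PySem.Chars.isIn [c] opsB.toList = isOpA c := by
  apply Bool.eq_iff_iff.mpr
  rw [hops]
  simp [PySem.Chars.isIn_iff_infix, List.singleton_infix_iff, isOpA]
  tauto

theorem two_isIn_cons (c d x y : Char) (r : List Char) :
    PySem.Chars.isIn [c, d] (x :: y :: r) = ((x == c && y == d) || PySem.Chars.isIn [c, d] (y :: r)) := by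
  apply Bool.eq_iff_iff.mpr
  simp [PySem.Chars.isIn_iff_infix, List.infix_cons_iff, List.cons_prefix_cons]
  tauto

theorem two_isIn_single (c d x : Char) : PySem.Chars.isIn [c, d] [x] = false := by
  simp [PySem.Chars.isIn_eq_false_iff, List.infix_singleton_iff]

-- B's substring test, on the list side
def BadB (m : List Char) : Bool := badListB.any fun p => PySem.Chars.isIn p.toList m

theorem grid (x y : Char) : bp x y =
    ((x == '+' && y == '+') || (x == '+' && y == '-') || (x == '+' && y == '*') || (x == '+' && y == '/') ||
     (x == '-' && y == '+') || (x == '-' && y == '-') || (x == '-' && y == '*') || (x == '-' && y == '/') ||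
     (x == '*' && y == '+') || (x == '*' && y == '-') || (x == '*' && y == '*') || (x == '*' && y == '/') ||
     (x == '/' && y == '+') || (x == '/' && y == '-') || (x == '/' && y == '*') || (x == '/' && y == '/') ||
     (x == '(' && y == '+') || (x == '(' && y == '-') || (x == '(' && y == '*') || (x == '(' && y == '/') ||
     (x == '+' && y == ')') || (x == '-' && y == ')') || (x == '*' && y == ')') || (x == '/' && y == ')')) := by
  simp only [bp, isOpA, Bool.and_or_distrib_left, Bool.and_or_distrib_right]
  ac_rfl

theorem BadB_step (x y : Char) (r : List Char) : BadB (x :: y :: r) = (bp x y || BadB (y :: r)) := by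
  rw [grid x y]
  simp only [BadB, badListB, hops, List.flatMap_cons, List.flatMap_nil, List.map_cons,
    List.map_nil, List.append_nil, List.any_append, List.any_cons, List.any_nil,
    toList_ofList, two_isIn_cons, Bool.or_false]
  ac_rfl

theorem BadB_single (x : Char) : BadB [x] = false := by
  simp only [BadB, badListB, hops, List.flatMap_cons, List.flatMap_nil, List.map_cons,
    List.map_nil, List.append_nil, List.any_append, List.any_cons, List.any_nil,
    toList_ofList, two_isIn_single, Bool.or_false]

-- B's condition as a chain over adjacent pairs (proof device)
def pairChain : Char → List Char → Bool
  | _, [] => true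
  | a, b :: r => !bp a b && pairChain b r

theorem BadB_eq_chain (l : List Char) (a : Char) : BadB (a :: l) = !(pairChain a l) := by
  induction l generalizing a with
  | nil => simp [BadB_single, pairChain]
  | cons b r ih => rw [BadB_step, ih b]; simp [pairChain]

theorem last?_cons (c p : Char) (r : List Char) :
    (c :: r).getLast?.getD p = r.getLast?.getD c := by
  cases r with
  | nil => rfl
  | cons x xs =>
    rw [List.getLast?_cons_cons]
    cases h : (x :: xs).getLast? with
    | none => simp at h
    | some y => rfl

-- Invariant of A's loop: whenever loopA p rest is reached with an operator as the
-- previous char p, the suffix is nonempty and its head is neither an operator nor ')'.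
theorem loopA_eq (rest : List Char) (p : Char)
    (h : isOpA p = true → rest ≠ [] ∧ rest.head? ≠ some ')' ∧ (rest.head?.map isOpA).getD false = false) :
    loopA p rest = (pairChain p rest && !isOpA (rest.getLastD p)) := by
  induction rest generalizing p with
  | nil =>
    cases hop : isOpA p with
    | false => simp [loopA, pairChain, hop]
    | true => exact absurd rfl (h hop).1
  | cons c r ih =>
    cases hc : isOpA c with
    | true =>
      have hp : isOpA p = false := by
        cases hpv : isOpA p with
        | false => rfl
        | true =>
          have := (h hpv).2.2
          simp [hc] at this
      by_cases hpar : p = '('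
      · simp [loopA, hc, hpar, pairChain, bp]
      · have hpar' : (p == '(') = false := by simp [hpar]
        cases r with
        | nil => simp [loopA, hc, hp, hpar', pairChain, bp]
        | cons h2 r2 =>
          by_cases hcl : h2 = ')'
          · simp [loopA, hc, hcl, pairChain, bp, hp, hpar']
          · have hcl' : (h2 == ')') = false := by simp [hcl]
            cases hh2 : isOpA h2 with
            | true => simp [loopA, hc, hp, hpar', hcl', hh2, pairChain, bp]
            | false =>
              have step : loopA p (c :: h2 :: r2) = loopA c (h2 :: r2) := by
                simp [loopA, hc, hp, hpar', hcl', hh2]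
              rw [step, ih c (by intro _; simp [hcl, hh2])]
              simp [pairChain, bp, hc, hp, hpar', hcl', hh2, last?_cons]
    | false =>
      have hok : bp p c = false := by
        cases hpv : isOpA p with
        | false => simp [bp, hc, hpv]
        | true =>
          have hne := (h hpv).2.1
          simp at hne
          simp [bp, hc, hpv, hne]
      have step : loopA p (c :: r) = loopA c r := by
        simp [loopA, hc]
      rw [step, ih c (by intro hcc; rw [hc] at hcc; cases hcc)]
      simp [pairChain, hok, last?_cons]

-- ===== VERDICT (by name: the statement is the Claim_ definition above) =====
theorem checkOperatorValidation_spec : Claim_equal_checkOperatorValidation := by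
  intro s _ hpre
  unfold Spec_checkOperatorValidation checkOperatorValidation checkOperatorValidation_alt
  have hne : s.toList ≠ [] := by simpa using hpre
  cases hl : s.toList with
  | nil => exact absurd hl hne
  | cons c0 rest =>
    have hBad : (badListB.any fun p => PySem.Str.isIn p s) = BadB (c0 :: rest) := by
      simp [BadB, PySem.Str.isIn_eq, hl]
    cases h0 : isOpA c0 with
    | true => simp [h0, single_isIn]
    | false =>
      have hloop := loopA_eq rest c0 (by simp [h0])
      simp only [h0, single_isIn, hloop, hBad, BadB_eq_chain, Bool.false_or, Bool.not_not]
      cases hlast : isOpA (rest.getLastD c0) <;> simp
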